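-- pv_equiv track=rewrite | github.com/kjsu0209/CodingTest | programmers/p68935.py | solution
-- ===== SOURCE A (Python) =====
-- def solution(n):
--     answer = 0
--     a = make_three(n)
--
--     a = list(a)
--     for i, w in enumerate(a):
--         if int(w) != 0:
--             answer += int(w) * (3**i)
--
--     return answer
--
-- def make_three(n):
--     if n < 3:
--         return str(n)
--     q, r = divmod(n, 3)
--     return make_three(q) + str(r)
-- ===== SOURCE B (Python) =====
-- def solution(n):
--     answer = 0
--     while n > 0:
--         n, r = divmod(n, 3)
--         answer = answer * 3 + r
--     return answer
-- ===== Notes on version B (the rewrite author's own statement) =====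
-- stated objective: simpler
-- what changed: Replaces the recursive base-3 string construction plus the enumerate/int/3**i power-sum loop with a single divmod loop that peels digits LSB-first and folds them with Horner's method into the reversed value.
import Mathlib
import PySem

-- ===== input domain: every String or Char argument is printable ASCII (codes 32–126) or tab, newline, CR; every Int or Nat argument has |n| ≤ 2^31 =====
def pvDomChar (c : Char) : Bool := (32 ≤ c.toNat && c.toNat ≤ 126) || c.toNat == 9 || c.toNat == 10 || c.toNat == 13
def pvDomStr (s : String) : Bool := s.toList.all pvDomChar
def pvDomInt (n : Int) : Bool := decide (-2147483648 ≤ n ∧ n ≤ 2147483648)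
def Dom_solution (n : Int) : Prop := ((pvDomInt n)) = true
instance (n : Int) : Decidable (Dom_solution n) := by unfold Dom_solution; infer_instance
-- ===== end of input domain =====

-- B replaces A's base-3 string construction + power-sum loop by one Horner divmod loop (simpler).

-- ===== PORT A =====
-- make_three, recursion made structural with a fuel of n.toNat (always sufficient: n // 3 shrinks
-- toward the n < 3 base case; fuel 0 forces n ≤ 0 < 3, where the same base branch is returned)
def makeThreeGo : Nat → Int → String
  | 0, n => PySem.Int.toStr n
  | f + 1, n =>
    if n < 3 then PySem.Int.toStr n
    else makeThreeGo f (PySem.Int.floordiv n 3) ++ PySem.Int.toStr (PySem.Int.mod n 3)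

def makeThree (n : Int) : String := makeThreeGo n.toNat n

-- int(w) for a one-character string; exact where the char is a digit (always the case on Pre_,
-- i.e. n ≥ 0); where Python's int() would raise ValueError the input is excluded by Pre_solution.
def valC (c : Char) : Int := (PySem.Int.ofStr? (String.ofList [c])).getD 0

def solution (n : Int) : Int :=
  (PySem.List.enumerate (makeThree n).toList).foldl
    (fun answer iw => if valC iw.2 ≠ 0 then answer + valC iw.2 * (3:Int) ^ iw.1.toNat else answer) 0

-- ===== PORT B =====
-- the while loop, with a fuel of n.toNat (sufficient: n // 3 shrinks n.toNat while n > 0;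
-- fuel 0 forces n ≤ 0, where the loop guard is false and answer is returned)
def altGoFuel : Nat → Int → Int → Int
  | 0, _, answer => answer
  | f + 1, n, answer =>
    if n > 0 then altGoFuel f (PySem.Int.floordiv n 3) (answer * 3 + PySem.Int.mod n 3)
    else answer

def altGo (n answer : Int) : Int := altGoFuel n.toNat n answer

def solution_alt (n : Int) : Int := altGo n 0

-- ===== PRECONDITION & SPEC =====
-- For n < 0, make_three emits a '-' sign character (e.g. "-1") and int('-…') raises ValueError,
-- so A returns only on n ≥ 0 (B would return 0 on negative n, since its loop never runs).
def Pre_solution (n : Int) : Prop := 0 ≤ n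
instance (n : Int) : Decidable (Pre_solution n) := by unfold Pre_solution; infer_instance
def pvWitness_solution : Int := 5

def Spec_solution (n : Int) (out : Int) : Prop := out = solution_alt n
instance (n : Int) (out : Int) : Decidable (Spec_solution n out) := by unfold Spec_solution; infer_instance

-- ===== CLAIM (what is proved, stated in full; the proofs are below) =====
def Claim_equal_solution : Prop := ∀ (n : Int), Dom_solution n → Pre_solution n → Spec_solution n (solution n)

-- ===== LEMMAS AND PROOFS =====

lemma makeThreeGo_fuel : ∀ (f g : Nat) (n : Int), n.toNat ≤ f → n.toNat ≤ g →
    makeThreeGo f n = makeThreeGo g n := by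
  intro f
  induction f with
  | zero =>
    intro g n hf _
    have h3 : n < 3 := by omega
    cases g with
    | zero => rfl
    | succ g => rw [makeThreeGo, makeThreeGo, if_pos h3]
  | succ f ih =>
    intro g n hf hg
    cases g with
    | zero =>
      have h3 : n < 3 := by omega
      rw [makeThreeGo, makeThreeGo, if_pos h3]
    | succ g =>
      rw [makeThreeGo, makeThreeGo]
      by_cases h3 : n < 3
      · rw [if_pos h3, if_pos h3]
      · rw [if_neg h3, if_neg h3]
        have hq : PySem.Int.floordiv n 3 = n / 3 := PySem.Int.floordiv_eq_ediv_of_pos (by omega)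
        have : (PySem.Int.floordiv n 3).toNat ≤ f ∧ (PySem.Int.floordiv n 3).toNat ≤ g := by omega
        rw [ih g (PySem.Int.floordiv n 3) this.1 this.2]

lemma makeThree_eq (n : Int) : makeThree n =
    if n < 3 then PySem.Int.toStr n
    else makeThree (PySem.Int.floordiv n 3) ++ PySem.Int.toStr (PySem.Int.mod n 3) := by
  by_cases h3 : n < 3
  · rw [if_pos h3]
    unfold makeThree
    cases hk : n.toNat with
    | zero => rfl
    | succ k => rw [makeThreeGo, if_pos h3]
  · rw [if_neg h3]
    unfold makeThree
    have hq : PySem.Int.floordiv n 3 = n / 3 := PySem.Int.floordiv_eq_ediv_of_pos (by omega)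
    cases hk : n.toNat with
    | zero => omega
    | succ k =>
      rw [makeThreeGo, if_neg h3,
        makeThreeGo_fuel k (PySem.Int.floordiv n 3).toNat (PySem.Int.floordiv n 3)
          (by omega) (le_refl _)]

lemma altGo_eq (n a : Int) : altGo n a =
    if n > 0 then altGo (PySem.Int.floordiv n 3) (a * 3 + PySem.Int.mod n 3) else a := by
  have goFuel : ∀ (f g : Nat) (m : Int), m.toNat ≤ f → m.toNat ≤ g → ∀ acc : Int,
      altGoFuel f m acc = altGoFuel g m acc := by
    intro f
    induction f with
    | zero =>
      intro g m hf _ acc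
      cases g with
      | zero => rfl
      | succ g => rw [altGoFuel, altGoFuel, if_neg (by omega)]
    | succ f ih =>
      intro g m hf hg acc
      cases g with
      | zero => rw [altGoFuel, altGoFuel, if_neg (by omega)]
      | succ g =>
        rw [altGoFuel, altGoFuel]
        by_cases hp : m > 0
        · rw [if_pos hp, if_pos hp]
          have hq : PySem.Int.floordiv m 3 = m / 3 := PySem.Int.floordiv_eq_ediv_of_pos (by omega)
          have : (PySem.Int.floordiv m 3).toNat ≤ f ∧ (PySem.Int.floordiv m 3).toNat ≤ g := by omega
          rw [ih g (PySem.Int.floordiv m 3) this.1 this.2]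
        · rw [if_neg hp, if_neg hp]
  by_cases hp : n > 0
  · rw [if_pos hp]
    unfold altGo
    cases hk : n.toNat with
    | zero => omega
    | succ k =>
      rw [altGoFuel, if_pos hp]
      have hq : PySem.Int.floordiv n 3 = n / 3 := PySem.Int.floordiv_eq_ediv_of_pos (by omega)
      exact goFuel k (PySem.Int.floordiv n 3).toNat (PySem.Int.floordiv n 3) (by omega) (le_refl _) _
  · rw [if_neg hp]
    unfold altGo
    cases hk : n.toNat with
    | zero => rfl
    | succ k => omega

lemma makeThree_lit (k : Int) (h : k < 3) : makeThree k = PySem.Int.toStr k := by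
  rw [makeThree_eq, if_pos h]

-- A's loop body, named so the proofs can speak about it (definitionally equal to solution's lambda)
def pvF : Int → Int × Char → Int :=
  fun answer iw => if valC iw.2 ≠ 0 then answer + valC iw.2 * (3:Int) ^ iw.1.toNat else answer

lemma solution_eq (n : Int) :
    solution n = (PySem.List.enumerate (makeThree n).toList).foldl pvF 0 := rfl

lemma foldl_last (l : List Char) (c : Char) :
    (PySem.List.enumerate (l ++ [c])).foldl pvF 0
      = (PySem.List.enumerate l).foldl pvF 0 + valC c * 3 ^ l.length := by
  rw [PySem.List.enumerate_append, List.foldl_append]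
  by_cases h : valC c = 0
  · simp [PySem.List.enumerate_cons, PySem.List.enumerate_nil, pvF, h]
  · simp [PySem.List.enumerate_cons, PySem.List.enumerate_nil, pvF, h]

lemma altGo_shift : ∀ (m : Nat) (n : Int), 1 ≤ n → n.toNat ≤ m → ∀ acc : Int,
    altGo n acc = acc * 3 ^ (makeThree n).toList.length + altGo n 0 := by
  intro m
  induction m with
  | zero => intro n h1 h2; omega
  | succ m ih =>
    intro n h1 h2 acc
    by_cases h3 : n < 3
    · interval_cases n
      · have e1 : ∀ a : Int, altGo 1 a = a * 3 + 1 := by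
          intro a
          rw [altGo_eq, if_pos (by norm_num),
            show PySem.Int.floordiv 1 3 = 0 from by decide,
            show PySem.Int.mod 1 3 = 1 from by decide, altGo_eq]
          norm_num
        rw [e1, e1, show (makeThree 1).toList.length = 1 from by rw [makeThree_lit 1 (by norm_num)]; decide]
        ring
      · have e2 : ∀ a : Int, altGo 2 a = a * 3 + 2 := by
          intro a
          rw [altGo_eq, if_pos (by norm_num),
            show PySem.Int.floordiv 2 3 = 0 from by decide,
            show PySem.Int.mod 2 3 = 2 from by decide, altGo_eq]
          norm_num
        rw [e2, e2, show (makeThree 2).toList.length = 1 from by rw [makeThree_lit 2 (by norm_num)]; decide]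
        ring
    · have hq3 : PySem.Int.floordiv n 3 = n / 3 := PySem.Int.floordiv_eq_ediv_of_pos (by omega)
      have hr3 : PySem.Int.mod n 3 = n % 3 := PySem.Int.mod_eq_emod_of_pos (by omega)
      have hq1 : 1 ≤ PySem.Int.floordiv n 3 := by omega
      have hqm : (PySem.Int.floordiv n 3).toNat ≤ m := by omega
      have hlr : ((PySem.Int.toStr (PySem.Int.mod n 3)).toList).length = 1 := by
        have : PySem.Int.mod n 3 = 0 ∨ PySem.Int.mod n 3 = 1 ∨ PySem.Int.mod n 3 = 2 := by omega
        rcases this with h | h | h <;> rw [h] <;> decide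
      have hlen : (makeThree n).toList.length
          = (makeThree (PySem.Int.floordiv n 3)).toList.length + 1 := by
        rw [makeThree_eq, if_neg h3, String.toList_append, List.length_append, hlr]
      have step : ∀ a : Int, altGo n a
          = altGo (PySem.Int.floordiv n 3) (a * 3 + PySem.Int.mod n 3) := by
        intro a; rw [altGo_eq, if_pos (by omega)]
      rw [step acc, step 0, hlen,
        ih _ hq1 hqm (acc * 3 + PySem.Int.mod n 3), ih _ hq1 hqm (0 * 3 + PySem.Int.mod n 3)]
      ring

lemma key : ∀ (m : Nat) (n : Int), 0 ≤ n → n.toNat ≤ m → solution n = altGo n 0 := by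
  intro m
  induction m with
  | zero =>
    intro n h1 h2
    have : n = 0 := by omega
    subst this; decide
  | succ m ih =>
    intro n h1 h2
    by_cases h3 : n < 3
    · interval_cases n <;> decide
    · have hq3 : PySem.Int.floordiv n 3 = n / 3 := PySem.Int.floordiv_eq_ediv_of_pos (by omega)
      have hr3 : PySem.Int.mod n 3 = n % 3 := PySem.Int.mod_eq_emod_of_pos (by omega)
      have hq1 : 1 ≤ PySem.Int.floordiv n 3 := by omega
      have hqm : (PySem.Int.floordiv n 3).toNat ≤ m := by omega
      have hsplit : (makeThree n).toList
          = (makeThree (PySem.Int.floordiv n 3)).toList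
            ++ (PySem.Int.toStr (PySem.Int.mod n 3)).toList := by
        rw [makeThree_eq, if_neg h3, String.toList_append]
      have step : altGo n 0 = altGo (PySem.Int.floordiv n 3) (0 * 3 + PySem.Int.mod n 3) := by
        rw [altGo_eq, if_pos (by omega)]
      have ihq := ih (PySem.Int.floordiv n 3) (by omega) hqm
      have hshift := altGo_shift m (PySem.Int.floordiv n 3) hq1 hqm (PySem.Int.mod n 3)
      have hr : PySem.Int.mod n 3 = 0 ∨ PySem.Int.mod n 3 = 1 ∨ PySem.Int.mod n 3 = 2 := by omega
      rcases hr with h | h | h <;>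
        rw [solution_eq, hsplit, h] <;>
        simp only [show (PySem.Int.toStr (0:Int)).toList = ['0'] from by decide,
          show (PySem.Int.toStr (1:Int)).toList = ['1'] from by decide,
          show (PySem.Int.toStr (2:Int)).toList = ['2'] from by decide] <;>
        rw [foldl_last, ← solution_eq, ihq, step, h] <;>
        simp only [show valC '0' = 0 from by decide, show valC '1' = 1 from by decide,
          show valC '2' = 2 from by decide, zero_mul, zero_add] <;>
        rw [h] at hshift <;>
        rw [hshift] <;>
        ring

-- ===== VERDICT (by name: the statement is the Claim_ definition above) =====
theorem solution_spec : Claim_equal_solution := by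
  intro n _ hp
  unfold Spec_solution solution_alt
  exact key n.toNat n hp le_rfl
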